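-- pv_equiv track=rewrite | github.com/Raito03/football_tracker | track_broadcast.py | temporal_smoothing
-- ===== SOURCE A (Python) =====
-- def temporal_smoothing(assignments, max_gap=10):
--     smoothed = {}
--     last_valid = {}
--     for frame_idx in sorted(assignments):
--         frame_ids = assignments[frame_idx]
--         smooth_frame = []
--         for i, pid in enumerate(frame_ids):
--             if pid is not None:
--                 last_valid[i] = (frame_idx, pid)
--                 smooth_frame.append(pid)
--             else:
--                 if i in last_valid and frame_idx - last_valid[i][0] <= max_gap:
--                     smooth_frame.append(last_valid[i][1])
--                 else:
--                     smooth_frame.append(None)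
--         smoothed[frame_idx] = smooth_frame
--     return smoothed
-- ===== SOURCE B (Python) =====
-- def _fill(earlier, f, max_gap, i):
--     # scan previously processed frames, most recent first, for column i's last valid id
--     for g, gids in earlier:
--         if i < len(gids) and gids[i] is not None:
--             return gids[i] if f - g <= max_gap else None
--     return None
--
--
-- def temporal_smoothing(assignments, max_gap=10):
--     out = {}
--     earlier = []  # processed (frame, ids) pairs, most recent first
--     for f in sorted(assignments):
--         ids = assignments[f]
--         out[f] = [pid if pid is not None else _fill(earlier, f, max_gap, i)
--                   for i, pid in enumerate(ids)]
--         earlier.insert(0, (f, ids))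
--     return out
-- ===== Notes on version B (the rewrite author's own statement) =====
-- stated objective: alternative
-- what changed: A carries a mutable per-column last_valid dictionary across frames; B keeps no per-column state and instead, for each None slot, scans the already-processed frames most-recent-first (with an early break) for the last valid id in that column.
import Mathlib
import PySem

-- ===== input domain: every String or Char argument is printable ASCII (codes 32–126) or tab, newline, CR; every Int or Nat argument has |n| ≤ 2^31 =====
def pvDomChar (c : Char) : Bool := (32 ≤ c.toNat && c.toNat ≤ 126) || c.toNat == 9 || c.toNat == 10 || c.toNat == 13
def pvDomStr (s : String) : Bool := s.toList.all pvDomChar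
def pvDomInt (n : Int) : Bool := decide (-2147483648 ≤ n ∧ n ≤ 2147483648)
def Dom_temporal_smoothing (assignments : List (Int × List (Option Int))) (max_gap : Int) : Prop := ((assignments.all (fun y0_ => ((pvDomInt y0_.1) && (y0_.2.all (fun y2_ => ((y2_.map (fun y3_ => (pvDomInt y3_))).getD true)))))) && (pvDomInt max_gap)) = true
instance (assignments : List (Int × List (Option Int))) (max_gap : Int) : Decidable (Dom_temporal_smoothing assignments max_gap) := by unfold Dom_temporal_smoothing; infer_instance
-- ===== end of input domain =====

-- B replaces A's mutable per-column last-valid dictionary by an on-demand backward scan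
-- (with early break) through the already-processed frames (objective: alternative).

-- ===== PORT A =====
-- inner 'for i, pid in enumerate(frame_ids)' loop: builds smooth_frame and updates last_valid
def aInner (f mg : Int) : List (Option Int) → Nat → PySem.Dict Int (Int × Int) →
    List (Option Int) × PySem.Dict Int (Int × Int)
  | [], _, lv => ([], lv)
  | pid :: rest, n, lv =>
    match pid with
    | some p =>
      let r := aInner f mg rest (n + 1) (lv.insert (n : Int) (f, p))
      (some p :: r.1, r.2)
    | none =>
      let x : Option Int :=
        match lv.get? (n : Int) with
        | some gv => if f - gv.1 ≤ mg then some gv.2 else none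
        | none => none
      let r := aInner f mg rest (n + 1) lv
      (x :: r.1, r.2)

-- outer 'for frame_idx in sorted(assignments)' loop
def aLoop (d : PySem.Dict Int (List (Option Int))) (mg : Int) :
    List Int → PySem.Dict Int (List (Option Int)) → PySem.Dict Int (Int × Int) →
    PySem.Dict Int (List (Option Int))
  | [], sm, _ => sm
  | f :: rest, sm, lv =>
    let ids := (d.get? f).getD []   -- assignments[frame_idx]; key always present, so getD is exact
    let r := aInner f mg ids 0 lv
    aLoop d mg rest (sm.insert f r.1) r.2

def temporal_smoothing (assignments : List (Int × List (Option Int))) (max_gap : Int) :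
    List (Int × List (Option Int)) :=
  (aLoop (PySem.Dict.mk assignments) max_gap
    (PySem.List.sorted (assignments.map Prod.fst) (fun x => x) false)
    PySem.Dict.empty PySem.Dict.empty).items

-- ===== PORT B =====
-- _fill: scan previously processed frames, most recent first, break at first valid id in column i
def bFill (f mg : Int) (i : Nat) : List (Int × List (Option Int)) → Option Int
  | [] => none
  | (g, gids) :: rest =>
    match gids[i]? with
    | some (some v) => if f - g ≤ mg then some v else none
    | _ => bFill f mg i rest

-- the row comprehension '[pid if pid is not None else _fill(...) for i, pid in enumerate(ids)]'
def bRow (earlier : List (Int × List (Option Int))) (f mg : Int) :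
    List (Option Int) → Nat → List (Option Int)
  | [], _ => []
  | pid :: rest, i =>
    (match pid with | some p => some p | none => bFill f mg i earlier) :: bRow earlier f mg rest (i + 1)

-- outer 'for f in sorted(assignments)' loop, carrying out and earlier
def bLoop (d : PySem.Dict Int (List (Option Int))) (mg : Int) :
    List Int → PySem.Dict Int (List (Option Int)) → List (Int × List (Option Int)) →
    PySem.Dict Int (List (Option Int))
  | [], out, _ => out
  | f :: rest, out, earlier =>
    let ids := (d.get? f).getD []
    bLoop d mg rest (out.insert f (bRow earlier f mg ids 0)) ((f, ids) :: earlier)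

def temporal_smoothing_alt (assignments : List (Int × List (Option Int))) (max_gap : Int) :
    List (Int × List (Option Int)) :=
  (bLoop (PySem.Dict.mk assignments) max_gap
    (PySem.List.sorted (assignments.map Prod.fst) (fun x => x) false)
    PySem.Dict.empty []).items

-- ===== PRECONDITION & SPEC =====
def Spec_temporal_smoothing (assignments : List (Int × List (Option Int))) (max_gap : Int) (out : List (Int × List (Option Int))) : Prop := out = temporal_smoothing_alt assignments max_gap
instance (assignments : List (Int × List (Option Int))) (max_gap : Int) (out : List (Int × List (Option Int))) : Decidable (Spec_temporal_smoothing assignments max_gap out) := by unfold Spec_temporal_smoothing; infer_instance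

-- ===== CLAIM (what is proved, stated in full; the proofs are below) =====
def Claim_equal_temporal_smoothing : Prop := ∀ (assignments : List (Int × List (Option Int))) (max_gap : Int), Dom_temporal_smoothing assignments max_gap → Spec_temporal_smoothing assignments max_gap (temporal_smoothing assignments max_gap)

-- ===== LEMMAS AND PROOFS =====

-- the last valid (frame, pid) seen in column i among processed frames (most recent first)
def colFind (i : Nat) : List (Int × List (Option Int)) → Option (Int × Int)
  | [] => none
  | (g, gids) :: rest =>
    match gids[i]? with
    | some (some v) => some (g, v)
    | _ => colFind i rest

theorem bFill_eq_colFind (f mg : Int) (i : Nat) (earlier : List (Int × List (Option Int))) :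
    bFill f mg i earlier =
      match colFind i earlier with
      | some gv => if f - gv.1 ≤ mg then some gv.2 else none
      | none => none := by
  induction earlier with
  | nil => rfl
  | cons hd tl ih =>
    obtain ⟨g, gids⟩ := hd
    simp only [bFill, colFind]
    cases h : gids[i]? with
    | none => simpa using ih
    | some o => cases o <;> simp [ih]

theorem aInner_row (f mg : Int) (ids : List (Option Int)) (n : Nat)
    (lv : PySem.Dict Int (Int × Int)) (earlier : List (Int × List (Option Int)))
    (h : ∀ j : Nat, n ≤ j → lv.get? (j : Int) = colFind j earlier) :
    (aInner f mg ids n lv).1 = bRow earlier f mg ids n := by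
  induction ids generalizing n lv with
  | nil => rfl
  | cons pid rest ih =>
    cases pid with
    | some p =>
      simp only [aInner, bRow]
      congr 1
      refine ih (n + 1) _ ?_
      intro j hj
      rw [PySem.Dict.get?_insert_of_ne _ _ (by omega : (j : Int) ≠ (n : Int))]
      exact h j (by omega)
    | none =>
      simp only [aInner, bRow]
      congr 1
      · rw [h n le_rfl, bFill_eq_colFind]
      · exact ih (n + 1) lv (fun j _ => h j (by omega))

theorem aInner_lv (f mg : Int) (ids : List (Option Int)) (n : Nat)
    (lv : PySem.Dict Int (Int × Int)) (j : Nat) :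
    (aInner f mg ids n lv).2.get? (j : Int) =
      if n ≤ j then
        (match ids[j - n]? with
         | some (some v) => some (f, v)
         | _ => lv.get? (j : Int))
      else lv.get? (j : Int) := by
  induction ids generalizing n lv with
  | nil => simp [aInner]
  | cons pid rest ih =>
    cases pid with
    | some p =>
      simp only [aInner]
      rw [ih (n + 1) (lv.insert (n : Int) (f, p))]
      rcases Nat.lt_trichotomy j n with hlt | heq | hgt
      · rw [if_neg (by omega), if_neg (by omega),
          PySem.Dict.get?_insert_of_ne _ _ (by omega : (j : Int) ≠ (n : Int))]
      · subst heq
        rw [if_neg (by omega), if_pos le_rfl]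
        simp [PySem.Dict.get?_insert_self]
      · rw [if_pos (by omega), if_pos (by omega)]
        have : j - n = (j - (n + 1)) + 1 := by omega
        rw [this]
        cases h : rest[j - (n + 1)]? with
        | none => simp [h, PySem.Dict.get?_insert_of_ne _ _ (by omega : (j : Int) ≠ (n : Int))]
        | some o =>
          cases o <;>
            simp [h, PySem.Dict.get?_insert_of_ne _ _ (by omega : (j : Int) ≠ (n : Int))]
    | none =>
      simp only [aInner]
      rw [ih (n + 1) lv]
      rcases Nat.lt_trichotomy j n with hlt | heq | hgt
      · rw [if_neg (by omega), if_neg (by omega)]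
      · subst heq
        rw [if_neg (by omega), if_pos le_rfl]
        simp
      · rw [if_pos (by omega), if_pos (by omega)]
        have : j - n = (j - (n + 1)) + 1 := by omega
        rw [this]
        cases h : rest[j - (n + 1)]? with
        | none => simp [h]
        | some o => cases o <;> simp [h]

theorem loop_eq (d : PySem.Dict Int (List (Option Int))) (mg : Int) (ks : List Int)
    (sm : PySem.Dict Int (List (Option Int))) (lv : PySem.Dict Int (Int × Int))
    (earlier : List (Int × List (Option Int)))
    (h : ∀ j : Nat, lv.get? (j : Int) = colFind j earlier) :
    aLoop d mg ks sm lv = bLoop d mg ks sm earlier := by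
  induction ks generalizing sm lv earlier with
  | nil => rfl
  | cons f rest ih =>
    simp only [aLoop, bLoop]
    rw [aInner_row f mg _ 0 lv earlier (fun j _ => h j)]
    refine ih _ _ _ ?_
    intro j
    rw [aInner_lv, if_pos (Nat.zero_le j)]
    simp only [Nat.sub_zero, colFind]
    cases hj : ((d.get? f).getD [])[j]? with
    | none => simp [h j]
    | some o => cases o <;> simp [h j]

-- ===== VERDICT (by name: the statement is the Claim_ definition above) =====
theorem temporal_smoothing_spec : Claim_equal_temporal_smoothing := by
  intro assignments max_gap _
  show _ = _
  unfold temporal_smoothing temporal_smoothing_alt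
  rw [loop_eq]
  intro j
  simp [colFind]
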